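-- pv_equiv track=rewrite | github.com/pahyde/math-senior-seminar | chi_gen.py | possible_mappings
-- ===== SOURCE A (Python) =====
-- def possible_mappings(from_to_pairs):
--     mappings = []
--     for mask in range(1 << len(from_to_pairs)):
--         mapping = []
--         for (b1,b2), (r1,r2) in from_to_pairs:
--             if mask & 1:
--                 mapping.append([b1,r1])
--                 mapping.append([b2,r2])
--             else:
--                 mapping.append([b1,r2])
--                 mapping.append([b2,r1])
--             mask >>= 1
--         mappings.append(mapping)
--     return mappings
-- ===== SOURCE B (Python) =====
-- def possible_mappings(from_to_pairs):
--     mappings = [[]]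
--     for (b1, b2), (r1, r2) in from_to_pairs:
--         mappings = ([m + [[b1, r2], [b2, r1]] for m in mappings]
--                     + [m + [[b1, r1], [b2, r2]] for m in mappings])
--     return mappings
-- ===== Notes on version B (the rewrite author's own statement) =====
-- stated objective: alternative
-- what changed: Replaces A's enumeration of 2^n integer bitmasks (re-scanning all pairs per mask) by a single incremental Cartesian-product fold over the pairs that doubles the mapping list at each pair, preserving A's output order.
import Mathlib
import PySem

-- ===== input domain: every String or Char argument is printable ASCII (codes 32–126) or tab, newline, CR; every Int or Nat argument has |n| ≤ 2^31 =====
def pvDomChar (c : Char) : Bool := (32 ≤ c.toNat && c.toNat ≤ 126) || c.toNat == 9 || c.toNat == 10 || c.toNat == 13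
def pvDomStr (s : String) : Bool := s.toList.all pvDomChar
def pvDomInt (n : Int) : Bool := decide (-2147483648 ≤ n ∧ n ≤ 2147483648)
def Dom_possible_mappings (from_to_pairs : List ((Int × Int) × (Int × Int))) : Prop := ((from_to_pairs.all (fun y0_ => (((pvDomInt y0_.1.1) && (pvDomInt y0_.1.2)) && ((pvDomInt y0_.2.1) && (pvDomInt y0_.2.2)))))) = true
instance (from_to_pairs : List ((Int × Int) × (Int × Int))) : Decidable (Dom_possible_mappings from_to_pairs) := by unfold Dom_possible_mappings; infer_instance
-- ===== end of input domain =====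

-- B replaces A's 2^n-mask enumeration by an incremental Cartesian-product fold over the pairs (objective: alternative decomposition, same output order).

-- ===== PORT A =====
-- A's inner loop: state is (mapping, mask); mask is the nonnegative loop value from range, so Nat; 'mask & 1' is mask % 2, 'mask >>= 1' is mask / 2.
def pmStep (acc : List (List Int) × Nat) (p : (Int × Int) × (Int × Int)) : List (List Int) × Nat :=
  if acc.2 % 2 = 1 then
    (acc.1 ++ [[p.1.1, p.2.1], [p.1.2, p.2.2]], acc.2 / 2)
  else
    (acc.1 ++ [[p.1.1, p.2.2], [p.1.2, p.2.1]], acc.2 / 2)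

def possible_mappings (from_to_pairs : List ((Int × Int) × (Int × Int))) : List (List (List Int)) :=
  (List.range (2 ^ from_to_pairs.length)).foldl
    (fun mappings mask => mappings ++ [(from_to_pairs.foldl pmStep ([], mask)).1]) []

-- ===== PORT B =====
def possible_mappings_alt (from_to_pairs : List ((Int × Int) × (Int × Int))) : List (List (List Int)) :=
  from_to_pairs.foldl
    (fun mappings p =>
      mappings.map (fun m => m ++ [[p.1.1, p.2.2], [p.1.2, p.2.1]])
        ++ mappings.map (fun m => m ++ [[p.1.1, p.2.1], [p.1.2, p.2.2]]))
    [[]]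

-- ===== PRECONDITION & SPEC =====
def Spec_possible_mappings (from_to_pairs : List ((Int × Int) × (Int × Int))) (out : List (List (List Int))) : Prop := out = possible_mappings_alt from_to_pairs
instance (from_to_pairs : List ((Int × Int) × (Int × Int))) (out : List (List (List Int))) : Decidable (Spec_possible_mappings from_to_pairs out) := by unfold Spec_possible_mappings; infer_instance

-- ===== CLAIM (what is proved, stated in full; the proofs are below) =====
def Claim_equal_possible_mappings : Prop := ∀ (from_to_pairs : List ((Int × Int) × (Int × Int))), Dom_possible_mappings from_to_pairs → Spec_possible_mappings from_to_pairs (possible_mappings from_to_pairs)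

-- ===== LEMMAS AND PROOFS =====

theorem pm_inner_acc (fps : List ((Int × Int) × (Int × Int))) (acc : List (List Int)) (mask : Nat) :
    fps.foldl pmStep (acc, mask)
      = (acc ++ (fps.foldl pmStep ([], mask)).1, (fps.foldl pmStep ([], mask)).2) := by
  induction fps generalizing acc mask with
  | nil => simp
  | cons p rest ih =>
      simp only [List.foldl_cons, pmStep, List.nil_append]
      split_ifs with h
      · rw [ih (acc ++ [[p.1.1, p.2.1], [p.1.2, p.2.2]]) (mask / 2),
          ih ([[p.1.1, p.2.1], [p.1.2, p.2.2]]) (mask / 2)]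
        simp
      · rw [ih (acc ++ [[p.1.1, p.2.2], [p.1.2, p.2.1]]) (mask / 2),
          ih ([[p.1.1, p.2.2], [p.1.2, p.2.1]]) (mask / 2)]
        simp

theorem pm_inner_snd (fps : List ((Int × Int) × (Int × Int))) (mask : Nat) :
    (fps.foldl pmStep ([], mask)).2 = mask / 2 ^ fps.length := by
  induction fps generalizing mask with
  | nil => simp
  | cons p rest ih =>
      simp only [List.foldl_cons, pmStep, List.length_cons, List.nil_append]
      split_ifs <;>
        (rw [pm_inner_acc _ _ (mask / 2)];
         simp [ih, Nat.div_div_eq_div_mul, pow_succ, Nat.mul_comm])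

theorem pm_inner_shift (fps : List ((Int × Int) × (Int × Int))) (mask t : Nat) :
    (fps.foldl pmStep ([], mask + 2 ^ fps.length * t)).1
      = (fps.foldl pmStep ([], mask)).1 := by
  induction fps generalizing mask with
  | nil => simp
  | cons p rest ih =>
      simp only [List.length_cons]
      have he : 2 ^ (rest.length + 1) * t = 2 * (2 ^ rest.length * t) := by ring
      have hmod : (mask + 2 ^ (rest.length + 1) * t) % 2 = mask % 2 := by omega
      have hdiv : (mask + 2 ^ (rest.length + 1) * t) / 2 = mask / 2 + 2 ^ rest.length * t := by
        omega
      simp only [List.foldl_cons, pmStep, hmod, hdiv, List.nil_append]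
      split_ifs <;>
        (rw [pm_inner_acc _ _ (mask / 2 + 2 ^ rest.length * t), pm_inner_acc _ _ (mask / 2)];
         simp [ih])

theorem pm_foldl_append_singleton {α β : Type} (l : List α) (f : α → β) (init : List β) :
    l.foldl (fun acc x => acc ++ [f x]) init = init ++ l.map f := by
  induction l generalizing init with
  | nil => simp
  | cons x xs ih => simp [ih]

theorem pm_A_eq_map (fps : List ((Int × Int) × (Int × Int))) :
    possible_mappings fps
      = (List.range (2 ^ fps.length)).map (fun m => (fps.foldl pmStep ([], m)).1) := by
  show (List.range (2 ^ fps.length)).foldl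
      (fun mappings mask => mappings ++ [(fps.foldl pmStep ([], mask)).1]) [] = _
  rw [pm_foldl_append_singleton]
  simp

theorem pm_main (fps : List ((Int × Int) × (Int × Int))) :
    possible_mappings fps = possible_mappings_alt fps := by
  induction fps using List.reverseRecOn with
  | nil => decide
  | append_singleton fps p ih =>
      have hB : possible_mappings_alt (fps ++ [p])
          = (possible_mappings_alt fps).map
              (fun m => m ++ [[p.1.1, p.2.2], [p.1.2, p.2.1]])
            ++ (possible_mappings_alt fps).map
              (fun m => m ++ [[p.1.1, p.2.1], [p.1.2, p.2.2]]) := by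
        simp [possible_mappings_alt, List.foldl_append]
      rw [pm_A_eq_map, hB, ← ih, pm_A_eq_map]
      have hlen : (fps ++ [p]).length = fps.length + 1 := by simp
      rw [hlen, pow_succ, Nat.mul_two, List.range_add, List.map_append]
      simp only [List.map_map]
      congr 1
      · apply List.map_congr_left
        intro m hm
        simp only [Function.comp_apply]
        have hmlt : m < 2 ^ fps.length := List.mem_range.mp hm
        have hsnd : (fps.foldl pmStep ([], m)).2 = 0 := by
          rw [pm_inner_snd]; exact Nat.div_eq_of_lt hmlt
        simp [List.foldl_append, pmStep, hsnd]
      · apply List.map_congr_left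
        intro m hm
        simp only [Function.comp_apply]
        have hmlt : m < 2 ^ fps.length := List.mem_range.mp hm
        have hrw : 2 ^ fps.length + m = m + 2 ^ fps.length * 1 := by ring
        have hfst : (fps.foldl pmStep ([], 2 ^ fps.length + m)).1
            = (fps.foldl pmStep ([], m)).1 := by
          rw [hrw, pm_inner_shift]
        have hsnd : (fps.foldl pmStep ([], 2 ^ fps.length + m)).2 = 1 := by
          rw [pm_inner_snd, Nat.add_comm, Nat.add_div_right m (Nat.two_pow_pos _),
            Nat.div_eq_of_lt hmlt]
        simp [List.foldl_append, pmStep, hsnd, hfst]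

-- ===== VERDICT (by name: the statement is the Claim_ definition above) =====
theorem possible_mappings_spec : Claim_equal_possible_mappings := by
  intro fps _
  unfold Spec_possible_mappings
  exact pm_main fps
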